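-- pv_equiv track=rewrite | github.com/FernandoBDAF/YoutubeRAG | business/stages/graphrag/community_detection.py | _compute_size_histogram
-- ===== SOURCE A (Python) =====
-- from typing import Dict, List, Any, Optional, Iterator
--
-- def _compute_size_histogram(sizes: List[int]) -> Dict[str, int]:
--     """
--     Compute size distribution histogram.
--
--     Args:
--         sizes: List of community sizes
--
--     Returns:
--         Histogram dictionary with bins
--     """
--     if not sizes:
--         return {}
--
--     bins = [0, 5, 10, 25, 50, 100, 500, 1000, float("inf")]
--     histogram = {}
--
--     for size in sizes:
--         for i in range(len(bins) - 1):
--             if bins[i] <= size < bins[i + 1]: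
--                 bin_label = (
--                     f"{bins[i]}-{bins[i+1] if bins[i+1] != float('inf') else 'inf'}"
--                 )
--                 histogram[bin_label] = histogram.get(bin_label, 0) + 1
--                 break
--
--     return histogram
-- ===== SOURCE B (Python) =====
-- from bisect import bisect_right
-- from typing import Dict, List
--
-- _BINS = [0, 5, 10, 25, 50, 100, 500, 1000]
--
-- def _compute_size_histogram(sizes: List[int]) -> Dict[str, int]:
--     if not sizes:
--         return {}
--     histogram = {}
--     for size in sizes:
--         idx = bisect_right(_BINS, size) - 1
--         if idx < 0:
--             continue  # negative sizes fall below every bin, as in the linear scan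
--         hi = "inf" if idx == len(_BINS) - 1 else _BINS[idx + 1]
--         label = f"{_BINS[idx]}-{hi}"
--         histogram[label] = histogram.get(label, 0) + 1
--     return histogram
-- ===== Notes on version B (the rewrite author's own statement) =====
-- stated objective: faster
-- what changed: Replaces A's per-size linear scan over all bin edges (with an in-loop f-string and float('inf') sentinel) by a single bisect_right lookup into the fixed sorted bin-edge list, skipping sizes that fall below the first edge.
import Mathlib
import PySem

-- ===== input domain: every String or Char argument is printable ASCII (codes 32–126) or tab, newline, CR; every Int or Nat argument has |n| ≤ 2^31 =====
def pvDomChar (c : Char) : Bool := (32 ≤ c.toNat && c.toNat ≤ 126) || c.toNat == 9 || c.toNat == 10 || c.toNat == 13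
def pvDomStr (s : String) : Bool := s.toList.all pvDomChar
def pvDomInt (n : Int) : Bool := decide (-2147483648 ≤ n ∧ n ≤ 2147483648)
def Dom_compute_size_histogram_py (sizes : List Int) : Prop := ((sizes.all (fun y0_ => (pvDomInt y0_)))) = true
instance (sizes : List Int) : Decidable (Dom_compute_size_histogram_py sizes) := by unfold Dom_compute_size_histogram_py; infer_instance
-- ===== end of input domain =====

-- B replaces A's per-size linear scan over bin edges by one bisect_right lookup (same return value; A is total).

-- ===== PORT A =====
-- A's bins list; 'none' encodes float('inf'), which A only compares with and prints as 'inf'.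
def pvBinsA : List (Option Int) :=
  [some 0, some 5, some 10, some 25, some 50, some 100, some 500, some 1000, none]
-- the (bins[i], bins[i+1]) pairs visited by 'for i in range(len(bins) - 1)'
def pvPairsA : List (Option Int × Option Int) := pvBinsA.zip pvBinsA.tail
-- bins[i] <= size  (inf <= size is False);  size < bins[i+1]  (size < inf is True)
def pvLeA (lo : Option Int) (s : Int) : Bool := match lo with | some v => decide (v ≤ s) | none => false
def pvLtA (s : Int) (hi : Option Int) : Bool := match hi with | some v => decide (s < v) | none => true
-- f-string rendering of a bin edge: str(int) or 'inf'
def pvShowA (x : Option Int) : String := match x with | some v => PySem.Int.toStr v | none => "inf"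
-- the inner 'for i in range(len(bins) - 1): … break' loop
def pvInnerA (size : Int) (hist : PySem.Dict String Int) :
    List (Option Int × Option Int) → PySem.Dict String Int
  | [] => hist
  | (lo, hi) :: rest =>
    if pvLeA lo size && pvLtA size hi then
      let lbl := pvShowA lo ++ "-" ++ pvShowA hi
      hist.insert lbl (hist.getD lbl 0 + 1)
    else pvInnerA size hist rest
def compute_size_histogram_py (sizes : List Int) : List (String × Int) :=
  if sizes = [] then []
  else (sizes.foldl (fun h s => pvInnerA s h pvPairsA) PySem.Dict.empty).items

-- ===== PORT B =====
def pvBinsB : List Int := [0, 5, 10, 25, 50, 100, 500, 1000]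
-- one size: idx = bisect_right(_BINS, size) - 1; skip when idx < 0; label from _BINS[idx], _BINS[idx+1]/'inf'
def pvStepB (hist : PySem.Dict String Int) (size : Int) : PySem.Dict String Int :=
  let idx : Int := (PySem.List.bisectRight pvBinsB size : Int) - 1
  if idx < 0 then hist
  else
    let i := idx.toNat
    let hi : String := if i = pvBinsB.length - 1 then "inf" else PySem.Int.toStr (pvBinsB.getD (i + 1) 0)
    let lbl := PySem.Int.toStr (pvBinsB.getD i 0) ++ "-" ++ hi
    hist.insert lbl (hist.getD lbl 0 + 1)
def compute_size_histogram_py_alt (sizes : List Int) : List (String × Int) :=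
  if sizes = [] then []
  else (sizes.foldl pvStepB PySem.Dict.empty).items

-- ===== PRECONDITION & SPEC =====
def Spec_compute_size_histogram_py (sizes : List Int) (out : List (String × Int)) : Prop := out = compute_size_histogram_py_alt sizes
instance (sizes : List Int) (out : List (String × Int)) : Decidable (Spec_compute_size_histogram_py sizes out) := by unfold Spec_compute_size_histogram_py; infer_instance

-- ===== CLAIM (what is proved, stated in full; the proofs are below) =====
def Claim_equal_compute_size_histogram_py : Prop := ∀ (sizes : List Int), Dom_compute_size_histogram_py sizes → Spec_compute_size_histogram_py sizes (compute_size_histogram_py sizes)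

-- ===== LEMMAS AND PROOFS =====

-- closed form of bisect_right on B's fixed bins
lemma pv_bisect_val (s : Int) : PySem.List.bisectRight pvBinsB s =
    if s < 0 then 0 else if s < 5 then 1 else if s < 10 then 2 else if s < 25 then 3
    else if s < 50 then 4 else if s < 100 then 5 else if s < 500 then 6 else if s < 1000 then 7 else 8 := by
  obtain ⟨hle, hlo, hhi⟩ := PySem.List.bisectRight_spec pvBinsB s (by decide)
  set n := PySem.List.bisectRight pvBinsB s with hn
  have h0l := hlo 0 (by decide); have h1l := hlo 1 (by decide); have h2l := hlo 2 (by decide)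
  have h3l := hlo 3 (by decide); have h4l := hlo 4 (by decide); have h5l := hlo 5 (by decide)
  have h6l := hlo 6 (by decide); have h7l := hlo 7 (by decide)
  have h0h := hhi 0 (by decide); have h1h := hhi 1 (by decide); have h2h := hhi 2 (by decide)
  have h3h := hhi 3 (by decide); have h4h := hhi 4 (by decide); have h5h := hhi 5 (by decide)
  have h6h := hhi 6 (by decide); have h7h := hhi 7 (by decide)
  simp only [pvBinsB, List.length_cons, List.length_nil] at *
  simp only [show ([0, 5, 10, 25, 50, 100, 500, 1000] : List Int)[0] = 0 from rfl] at h0l h0h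
  simp only [show ([0, 5, 10, 25, 50, 100, 500, 1000] : List Int)[1] = 5 from rfl] at h1l h1h
  simp only [show ([0, 5, 10, 25, 50, 100, 500, 1000] : List Int)[2] = 10 from rfl] at h2l h2h
  simp only [show ([0, 5, 10, 25, 50, 100, 500, 1000] : List Int)[3] = 25 from rfl] at h3l h3h
  simp only [show ([0, 5, 10, 25, 50, 100, 500, 1000] : List Int)[4] = 50 from rfl] at h4l h4h
  simp only [show ([0, 5, 10, 25, 50, 100, 500, 1000] : List Int)[5] = 100 from rfl] at h5l h5h
  simp only [show ([0, 5, 10, 25, 50, 100, 500, 1000] : List Int)[6] = 500 from rfl] at h6l h6h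
  simp only [show ([0, 5, 10, 25, 50, 100, 500, 1000] : List Int)[7] = 1000 from rfl] at h7l h7h
  split_ifs <;> omega

-- one size is processed identically by A's linear scan and B's bisect step
lemma pv_step_eq (h : PySem.Dict String Int) (s : Int) :
    pvInnerA s h pvPairsA = pvStepB h s := by
  rcases lt_or_ge s 0 with h1 | h1
  · simp only [pvStepB, pv_bisect_val]
    norm_num [show pvPairsA = [(some 0, some 5), (some 5, some 10), (some 10, some 25),
    (some 25, some 50), (some 50, some 100), (some 100, some 500), (some 500, some 1000),
    (some 1000, none)] from rfl, pvInnerA, pvLeA, pvLtA, pvShowA, pvBinsB, h1, show ¬ 0 ≤ s from by omega, show ¬ 5 ≤ s from by omega, show ¬ 10 ≤ s from by omega, show ¬ 25 ≤ s from by omega, show ¬ 50 ≤ s from by omega, show ¬ 100 ≤ s from by omega, show ¬ 500 ≤ s from by omega, show ¬ 1000 ≤ s from by omega]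
    try rfl
  rcases lt_or_ge s 5 with h2 | h2
  · simp only [pvStepB, pv_bisect_val]
    norm_num [show pvPairsA = [(some 0, some 5), (some 5, some 10), (some 10, some 25),
    (some 25, some 50), (some 50, some 100), (some 100, some 500), (some 500, some 1000),
    (some 1000, none)] from rfl, pvInnerA, pvLeA, pvLtA, pvShowA, pvBinsB, show (0:Int) ≤ s from by omega, show s < 5 from by omega, show ¬ s < 0 from by omega]
    try rfl
  rcases lt_or_ge s 10 with h3 | h3
  · simp only [pvStepB, pv_bisect_val]
    norm_num [show pvPairsA = [(some 0, some 5), (some 5, some 10), (some 10, some 25),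
    (some 25, some 50), (some 50, some 100), (some 100, some 500), (some 500, some 1000),
    (some 1000, none)] from rfl, pvInnerA, pvLeA, pvLtA, pvShowA, pvBinsB, show (5:Int) ≤ s from by omega, show s < 10 from by omega, show ¬ s < 0 from by omega, show ¬ s < 5 from by omega]
    try rfl
  rcases lt_or_ge s 25 with h4 | h4
  · simp only [pvStepB, pv_bisect_val]
    norm_num [show pvPairsA = [(some 0, some 5), (some 5, some 10), (some 10, some 25),
    (some 25, some 50), (some 50, some 100), (some 100, some 500), (some 500, some 1000),
    (some 1000, none)] from rfl, pvInnerA, pvLeA, pvLtA, pvShowA, pvBinsB, show (10:Int) ≤ s from by omega, show s < 25 from by omega, show ¬ s < 0 from by omega, show ¬ s < 5 from by omega, show ¬ s < 10 from by omega]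
    try rfl
  rcases lt_or_ge s 50 with h5 | h5
  · simp only [pvStepB, pv_bisect_val]
    norm_num [show pvPairsA = [(some 0, some 5), (some 5, some 10), (some 10, some 25),
    (some 25, some 50), (some 50, some 100), (some 100, some 500), (some 500, some 1000),
    (some 1000, none)] from rfl, pvInnerA, pvLeA, pvLtA, pvShowA, pvBinsB, show (25:Int) ≤ s from by omega, show s < 50 from by omega, show ¬ s < 0 from by omega, show ¬ s < 5 from by omega, show ¬ s < 10 from by omega, show ¬ s < 25 from by omega]
    try rfl
  rcases lt_or_ge s 100 with h6 | h6
  · simp only [pvStepB, pv_bisect_val]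
    norm_num [show pvPairsA = [(some 0, some 5), (some 5, some 10), (some 10, some 25),
    (some 25, some 50), (some 50, some 100), (some 100, some 500), (some 500, some 1000),
    (some 1000, none)] from rfl, pvInnerA, pvLeA, pvLtA, pvShowA, pvBinsB, show (50:Int) ≤ s from by omega, show s < 100 from by omega, show ¬ s < 0 from by omega, show ¬ s < 5 from by omega, show ¬ s < 10 from by omega, show ¬ s < 25 from by omega, show ¬ s < 50 from by omega]
    try rfl
  rcases lt_or_ge s 500 with h7 | h7
  · simp only [pvStepB, pv_bisect_val]
    norm_num [show pvPairsA = [(some 0, some 5), (some 5, some 10), (some 10, some 25),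
    (some 25, some 50), (some 50, some 100), (some 100, some 500), (some 500, some 1000),
    (some 1000, none)] from rfl, pvInnerA, pvLeA, pvLtA, pvShowA, pvBinsB, show (100:Int) ≤ s from by omega, show s < 500 from by omega, show ¬ s < 0 from by omega, show ¬ s < 5 from by omega, show ¬ s < 10 from by omega, show ¬ s < 25 from by omega, show ¬ s < 50 from by omega, show ¬ s < 100 from by omega]
    try rfl
  rcases lt_or_ge s 1000 with h8 | h8
  · simp only [pvStepB, pv_bisect_val]
    norm_num [show pvPairsA = [(some 0, some 5), (some 5, some 10), (some 10, some 25),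
    (some 25, some 50), (some 50, some 100), (some 100, some 500), (some 500, some 1000),
    (some 1000, none)] from rfl, pvInnerA, pvLeA, pvLtA, pvShowA, pvBinsB, show (500:Int) ≤ s from by omega, show s < 1000 from by omega, show ¬ s < 0 from by omega, show ¬ s < 5 from by omega, show ¬ s < 10 from by omega, show ¬ s < 25 from by omega, show ¬ s < 50 from by omega, show ¬ s < 100 from by omega, show ¬ s < 500 from by omega]
    try rfl
  simp only [pvStepB, pv_bisect_val]
  norm_num [show pvPairsA = [(some 0, some 5), (some 5, some 10), (some 10, some 25),
    (some 25, some 50), (some 50, some 100), (some 100, some 500), (some 500, some 1000),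
    (some 1000, none)] from rfl, pvInnerA, pvLeA, pvLtA, pvShowA, pvBinsB, show (1000:Int) ≤ s from by omega, show ¬ s < 0 from by omega, show ¬ s < 5 from by omega, show ¬ s < 10 from by omega, show ¬ s < 25 from by omega, show ¬ s < 50 from by omega, show ¬ s < 100 from by omega, show ¬ s < 500 from by omega, show ¬ s < 1000 from by omega]
  try rfl

-- ===== VERDICT (by name: the statement is the Claim_ definition above) =====
theorem compute_size_histogram_py_spec : Claim_equal_compute_size_histogram_py := by
  intro sizes _
  unfold Spec_compute_size_histogram_py compute_size_histogram_py compute_size_histogram_py_alt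
  rw [show (fun (h : PySem.Dict String Int) (s : Int) => pvInnerA s h pvPairsA) = pvStepB from
    funext fun h => funext fun s => pv_step_eq h s]
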